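-- pv_equiv track=rewrite | github.com/UndefinedDatabase/remedy | packages/orchestration/repo_applicator.py | _build_repo_file_content
-- ===== SOURCE A (Python) =====
-- _ARTIFACT_SECTION_HEADERS = frozenset({"Proposed Changes:", "Notes:", "Risks:"})
--
-- def _build_repo_file_content(task_type: str, summary: str, artifact_content: str) -> str:
--     """Build the markdown file content for the target repo.
--
--     Extracts only the Proposed Changes section from artifact_content
--     (section-aware: Notes and Risks are excluded even though they share the
--     "  - " prefix). Converts "  - item" workspace format to "- item" bullets.
--     """
--     title = task_type.replace("_", " ").title()
--     lines: list[str] = [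
--         f"# {title}",
--         "",
--         "> Generated by Remedy",
--         "",
--         f"**Summary:** {summary}",
--         "",
--         "## Proposed Changes",
--         "",
--     ]
--     in_proposed = False
--     for line in artifact_content.splitlines():
--         if line == "Proposed Changes:":
--             in_proposed = True
--         elif line in _ARTIFACT_SECTION_HEADERS:
--             in_proposed = False
--         elif in_proposed and line.startswith("  - "):
--             # Strip leading spaces to convert "  - item" → "- item"
--             lines.append(line.lstrip())
--     lines.append("")
--     return "\n".join(lines)
-- ===== SOURCE B (Python) =====
-- _ARTIFACT_SECTION_HEADERS = frozenset({"Proposed Changes:", "Notes:", "Risks:"})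
--
--
-- def _parse_sections(text):
--     """Phase 1: segment lines into sections keyed by the header line they follow.
--
--     Lines before any header are keyed by None; repeated headers accumulate in
--     document order."""
--     sections = {}
--     current = None
--     for line in text.splitlines():
--         if line in _ARTIFACT_SECTION_HEADERS:
--             current = line
--         else:
--             sections.setdefault(current, []).append(line)
--     return sections
--
--
-- def _build_repo_file_content(task_type: str, summary: str, artifact_content: str) -> str:
--     sections = _parse_sections(artifact_content)
--     # Phase 2: format — keep only the workspace bullets of the Proposed Changes section.
--     bullets = [line.lstrip() for line in sections.get("Proposed Changes:", [])
--                if line.startswith("  - ")]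
--     title = task_type.replace("_", " ").title()
--     header = [
--         f"# {title}",
--         "",
--         "> Generated by Remedy",
--         "",
--         f"**Summary:** {summary}",
--         "",
--         "## Proposed Changes",
--         "",
--     ]
--     return "\n".join(header + bullets + [""])
-- ===== Notes on version B (the rewrite author's own statement) =====
-- stated objective: alternative
-- what changed: B replaces A's single flag-driven filter loop with a parse-then-format decomposition: a first pass segments all lines into a dict of sections keyed by the current header line (accumulating across repeated headers), and a second pass filters and reformats the lines recorded under 'Proposed Changes:' into the fixed markdown template.
import Mathlib
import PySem

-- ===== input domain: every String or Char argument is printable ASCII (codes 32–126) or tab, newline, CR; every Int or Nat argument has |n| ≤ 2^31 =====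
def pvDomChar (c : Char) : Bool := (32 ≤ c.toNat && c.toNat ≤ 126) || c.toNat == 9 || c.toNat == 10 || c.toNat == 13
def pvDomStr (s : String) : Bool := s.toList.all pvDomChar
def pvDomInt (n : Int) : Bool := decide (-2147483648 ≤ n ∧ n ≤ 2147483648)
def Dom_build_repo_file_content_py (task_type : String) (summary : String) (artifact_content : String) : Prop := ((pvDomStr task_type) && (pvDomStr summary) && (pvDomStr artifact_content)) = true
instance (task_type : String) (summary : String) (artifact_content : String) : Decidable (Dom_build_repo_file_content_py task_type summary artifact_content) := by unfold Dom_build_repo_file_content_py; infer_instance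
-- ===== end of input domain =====

-- B re-implements the extraction as parse-then-format (segment all lines into sections first,
-- then format the Proposed Changes section) instead of A's single flag-driven filter loop;
-- objective: alternative decomposition, same asymptotic cost.

-- str.title() for the ASCII domain: a letter is uppercased after a non-letter, lowercased after a
-- letter (exact on Dom: within ASCII, Python's "cased" characters are exactly the letters).
-- Shared by both ports: both Pythons compute the title by the same expression.
def pvTitleAux : List Char → Bool → List Char
  | [], _ => []
  | c :: rest, prev =>
    (if c.isAlpha then (if prev then c.toLower else c.toUpper) else c) :: pvTitleAux rest c.isAlpha

def pvTitle (s : String) : String := String.ofList (pvTitleAux s.toList false)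

-- frozenset _ARTIFACT_SECTION_HEADERS (used for membership only, so order is irrelevant)
def pvHeaders : List String := ["Proposed Changes:", "Notes:", "Risks:"]

-- ===== PORT A =====
-- the body of A's flag-driven loop: state = (in_proposed, lines)
def pvStepA (st : Bool × List String) (line : String) : Bool × List String :=
  if line = "Proposed Changes:" then (true, st.2)
  else if pvHeaders.contains line then (false, st.2)
  else if st.1 && PySem.Str.startswith line "  - " then (st.1, st.2 ++ [PySem.Str.lstrip line])
  else st

def build_repo_file_content_py (task_type : String) (summary : String) (artifact_content : String) : String :=
  PySem.Str.join "\n"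
    (((PySem.Str.splitlines artifact_content).foldl pvStepA
        (false,
         ["# " ++ pvTitle (PySem.Str.replace task_type "_" " "), "", "> Generated by Remedy", "",
          "**Summary:** " ++ summary, "", "## Proposed Changes", ""])).2
      ++ [""])

-- ===== PORT B =====
-- the body of Source B's _parse_sections loop: state = (current, sections);
-- sections.setdefault(current, []).append(line) is Dict.modify current [] (· ++ [line])
def pvStepB (st : Option String × PySem.Dict (Option String) (List String)) (line : String) :
    Option String × PySem.Dict (Option String) (List String) :=
  if pvHeaders.contains line then (some line, st.2)
  else (st.1, st.2.modify st.1 [] (· ++ [line]))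

-- phase 1 of Source B: _parse_sections
def pvParseSections (text : String) : PySem.Dict (Option String) (List String) :=
  ((PySem.Str.splitlines text).foldl pvStepB (none, PySem.Dict.empty)).2

def build_repo_file_content_py_alt (task_type : String) (summary : String) (artifact_content : String) : String :=
  PySem.Str.join "\n"
    (["# " ++ pvTitle (PySem.Str.replace task_type "_" " "), "", "> Generated by Remedy", "",
      "**Summary:** " ++ summary, "", "## Proposed Changes", ""]
     ++ (((pvParseSections artifact_content).getD (some "Proposed Changes:") []).filter
          (fun line => PySem.Str.startswith line "  - ")).map PySem.Str.lstrip
     ++ [""])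

-- ===== PRECONDITION & SPEC =====
def Spec_build_repo_file_content_py (task_type : String) (summary : String) (artifact_content : String) (out : String) : Prop := out = build_repo_file_content_py_alt task_type summary artifact_content
instance (task_type : String) (summary : String) (artifact_content : String) (out : String) : Decidable (Spec_build_repo_file_content_py task_type summary artifact_content out) := by unfold Spec_build_repo_file_content_py; infer_instance

-- ===== CLAIM (what is proved, stated in full; the proofs are below) =====
def Claim_equal_build_repo_file_content_py : Prop := ∀ (task_type : String) (summary : String) (artifact_content : String), Dom_build_repo_file_content_py task_type summary artifact_content → Spec_build_repo_file_content_py task_type summary artifact_content (build_repo_file_content_py task_type summary artifact_content)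

-- ===== LEMMAS AND PROOFS =====

-- the lines of the Proposed Changes section(s), in document order, given the current in-section flag
def pvCollect : List String → Bool → List String
  | [], _ => []
  | l :: rest, b =>
    if l = "Proposed Changes:" then pvCollect rest true
    else if pvHeaders.contains l then pvCollect rest false
    else (if b then [l] else []) ++ pvCollect rest b

def pvFmt (xs : List String) : List String :=
  (xs.filter (fun line => PySem.Str.startswith line "  - ")).map PySem.Str.lstrip

theorem pvLoopA (lines : List String) (b : Bool) (acc : List String) :
    (lines.foldl pvStepA (b, acc)).2 = acc ++ pvFmt (pvCollect lines b) := by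
  induction lines generalizing b acc with
  | nil => simp [pvCollect, pvFmt]
  | cons l rest ih =>
    rw [List.foldl_cons]
    by_cases h1 : l = "Proposed Changes:"
    · rw [show pvStepA (b, acc) l = (true, acc) from by simp [pvStepA, h1],
        show pvCollect (l :: rest) b = pvCollect rest true from by simp [pvCollect, h1], ih]
    · by_cases h2 : l ∈ pvHeaders
      · rw [show pvStepA (b, acc) l = (false, acc) from by simp [pvStepA, h1, h2],
          show pvCollect (l :: rest) b = pvCollect rest false from by simp [pvCollect, h1, h2], ih]
      · have hc : pvCollect (l :: rest) b = (if b then [l] else []) ++ pvCollect rest b := by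
          simp [pvCollect, h1, h2]
        cases b with
        | false =>
          rw [show pvStepA (false, acc) l = (false, acc) from by simp [pvStepA, h1, h2], ih, hc]
          simp
        | true =>
          by_cases h3 : PySem.Chars.startswith l.toList [' ', ' ', '-', ' ']
          · rw [show pvStepA (true, acc) l = (true, acc ++ [PySem.Str.lstrip l]) from by
                simp [pvStepA, h1, h2, h3], ih, hc]
            simp [pvFmt, h3]
          · rw [show pvStepA (true, acc) l = (true, acc) from by simp [pvStepA, h1, h2, h3],
              ih, hc]
            simp [pvFmt, h3]

theorem pvLoopB (lines : List String) (cur : Option String)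
    (d : PySem.Dict (Option String) (List String)) :
    ((lines.foldl pvStepB (cur, d)).2).getD (some "Proposed Changes:") []
    = d.getD (some "Proposed Changes:") []
      ++ pvCollect lines (decide (cur = some "Proposed Changes:")) := by
  induction lines generalizing cur d with
  | nil => simp [pvCollect]
  | cons l rest ih =>
    rw [List.foldl_cons]
    by_cases h2 : l ∈ pvHeaders
    · rw [show pvStepB (cur, d) l = (some l, d) from by simp [pvStepB, h2], ih]
      by_cases h1 : l = "Proposed Changes:"
      · rw [show pvCollect (l :: rest) (decide (cur = some "Proposed Changes:"))
              = pvCollect rest true from by simp [pvCollect, h1]]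
        simp [h1]
      · rw [show pvCollect (l :: rest) (decide (cur = some "Proposed Changes:"))
              = pvCollect rest false from by simp [pvCollect, h1, h2]]
        simp [h1]
    · have h1 : l ≠ "Proposed Changes:" := by
        intro h; subst h; exact h2 (by simp [pvHeaders])
      rw [show pvStepB (cur, d) l = (cur, d.modify cur [] (· ++ [l])) from by simp [pvStepB, h2],
        ih, PySem.Dict.getD_modify,
        show pvCollect (l :: rest) (decide (cur = some "Proposed Changes:"))
            = (if decide (cur = some "Proposed Changes:") then [l] else [])
              ++ pvCollect rest (decide (cur = some "Proposed Changes:")) from by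
          simp [pvCollect, h1, h2]]
      by_cases h3 : cur = some "Proposed Changes:"
      · simp [h3]
      · have h3' : ¬ ((some "Proposed Changes:" : Option String) = cur) := fun h => h3 h.symm
        simp [h3, h3']

-- ===== VERDICT (by name: the statement is the Claim_ definition above) =====
theorem build_repo_file_content_py_spec : Claim_equal_build_repo_file_content_py := by
  intro task_type summary artifact_content _
  unfold Spec_build_repo_file_content_py build_repo_file_content_py build_repo_file_content_py_alt pvParseSections
  rw [pvLoopA, pvLoopB]
  simp [pvFmt]
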